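-- pv_equiv track=rewrite | github.com/ahmednasr999/openclaw-workspace | scripts/scout-ats.py | score_seniority
-- ===== SOURCE A (Python) =====
-- SENIORITY_TIERS = {
--     # Tier 1: Perfect level (20 pts)
--     "chief": 20, "cto": 20, "cdo": 20, "cio": 20, "cpo": 20,
--     "vice president": 20, "vp ": 20,
--     # Tier 2: Strong fit (16 pts)
--     "senior director": 16, "executive director": 16,
--     "head of": 16, "director": 14,
--     # Tier 3: Acceptable (10 pts)
--     "senior manager": 10, "principal": 10,
--     # Tier 4: Below target (5 pts)
--     "manager": 5, "lead": 5,
--     # Tier 5: Too junior (0 pts)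
--     "analyst": 0, "coordinator": 0, "associate": 0, "specialist": 0,
-- }
--
-- def score_seniority(jd):
--     """Score seniority level (0-20)"""
--     best = 0
--     matched_level = "unknown"
--     for title, pts in SENIORITY_TIERS.items():
--         if title in jd and pts > best:
--             best = pts
--             matched_level = title
--     return best, matched_level
-- ===== SOURCE B (Python) =====
-- # Tiers grouped by points, highest first; within a group the original priority order.
-- TIER_GROUPS = [
--     (20, ["chief", "cto", "cdo", "cio", "cpo", "vice president", "vp "]),
--     (16, ["senior director", "executive director", "head of"]),
--     (14, ["director"]),
--     (10, ["senior manager", "principal"]),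
--     (5,  ["manager", "lead"]),
-- ]
--
-- def score_seniority(jd):
--     """Score seniority level (0-20): walk the point buckets from highest to
--     lowest and return the first title found in the job description."""
--     for pts, titles in TIER_GROUPS:
--         for title in titles:
--             if title in jd:
--                 return pts, title
--     return 0, "unknown"
-- ===== Notes on version B (the rewrite author's own statement) =====
-- stated objective: alternative
-- what changed: B replaces A's running-max scan over a flat title->points dict with a bucketed table: tiers are pre-grouped by points in descending order and B returns the first substring hit walking the buckets, so no best/matched state is maintained.
import Mathlib
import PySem

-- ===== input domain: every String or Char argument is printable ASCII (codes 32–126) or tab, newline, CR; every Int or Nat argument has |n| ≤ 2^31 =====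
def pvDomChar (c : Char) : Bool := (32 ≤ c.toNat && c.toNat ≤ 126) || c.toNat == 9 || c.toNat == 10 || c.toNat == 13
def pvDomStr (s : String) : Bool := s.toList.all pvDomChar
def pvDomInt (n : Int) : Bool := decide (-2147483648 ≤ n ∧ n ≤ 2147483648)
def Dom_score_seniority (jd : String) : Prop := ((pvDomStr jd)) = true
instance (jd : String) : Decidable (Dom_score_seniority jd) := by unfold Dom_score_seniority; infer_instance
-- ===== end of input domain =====

-- B differs from A in decomposition: A keeps a running maximum over a flat dict,
-- B walks a table of point-buckets (highest first) and returns the first substring hit.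

-- ===== PORT A =====
-- module constant SENIORITY_TIERS (a dict, ported as an association list in insertion order)
def SENIORITY_TIERS : List (String × Int) :=
  [("chief", 20), ("cto", 20), ("cdo", 20), ("cio", 20), ("cpo", 20),
   ("vice president", 20), ("vp ", 20),
   ("senior director", 16), ("executive director", 16),
   ("head of", 16), ("director", 14),
   ("senior manager", 10), ("principal", 10),
   ("manager", 5), ("lead", 5),
   ("analyst", 0), ("coordinator", 0), ("associate", 0), ("specialist", 0)]

-- for title, pts in SENIORITY_TIERS.items(): if title in jd and pts > best: update
def score_seniority (jd : String) : Int × String :=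
  SENIORITY_TIERS.foldl
    (fun st tp =>
      if PySem.Str.isIn tp.1 jd && decide (st.1 < tp.2) then (tp.2, tp.1) else st)
    (0, "unknown")

-- ===== PORT B =====
-- B's bucketed table: (points, titles) with points strictly descending
def TIER_GROUPS : List (Int × List String) :=
  [(20, ["chief", "cto", "cdo", "cio", "cpo", "vice president", "vp "]),
   (16, ["senior director", "executive director", "head of"]),
   (14, ["director"]),
   (10, ["senior manager", "principal"]),
   (5,  ["manager", "lead"])]

-- inner loop: first title of the bucket contained in jd
def firstHit (jd : String) : List String → Option String
  | [] => none
  | t :: ts => if PySem.Str.isIn t jd then some t else firstHit jd ts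

-- outer loop: walk the buckets, highest points first
def walkGroups (jd : String) : List (Int × List String) → Int × String
  | [] => (0, "unknown")
  | (pts, titles) :: rest =>
    match firstHit jd titles with
    | some t => (pts, t)
    | none => walkGroups jd rest

def score_seniority_alt (jd : String) : Int × String :=
  walkGroups jd TIER_GROUPS

-- ===== PRECONDITION & SPEC =====
def Spec_score_seniority (jd : String) (out : Int × String) : Prop := out = score_seniority_alt jd
instance (jd : String) (out : Int × String) : Decidable (Spec_score_seniority jd out) := by unfold Spec_score_seniority; infer_instance

-- ===== CLAIM (what is proved, stated in full; the proofs are below) =====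
def Claim_equal_score_seniority : Prop := ∀ (jd : String), Dom_score_seniority jd → Spec_score_seniority jd (score_seniority jd)

-- ===== LEMMAS AND PROOFS =====

theorem score_seniority_eq (jd : String) : score_seniority jd = score_seniority_alt jd := by
  unfold score_seniority score_seniority_alt SENIORITY_TIERS TIER_GROUPS
  cases h1 : PySem.Str.isIn "chief" jd
  case true => simp_all [walkGroups, firstHit]
  case false =>
    cases h2 : PySem.Str.isIn "cto" jd
    case true => simp_all [walkGroups, firstHit]
    case false =>
      cases h3 : PySem.Str.isIn "cdo" jd
      case true => simp_all [walkGroups, firstHit]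
      case false =>
        cases h4 : PySem.Str.isIn "cio" jd
        case true => simp_all [walkGroups, firstHit]
        case false =>
          cases h5 : PySem.Str.isIn "cpo" jd
          case true => simp_all [walkGroups, firstHit]
          case false =>
            cases h6 : PySem.Str.isIn "vice president" jd
            case true => simp_all [walkGroups, firstHit]
            case false =>
              cases h7 : PySem.Str.isIn "vp " jd
              case true => simp_all [walkGroups, firstHit]
              case false =>
                cases h8 : PySem.Str.isIn "senior director" jd
                case true => simp_all [walkGroups, firstHit]
                case false =>
                  cases h9 : PySem.Str.isIn "executive director" jd
                  case true => simp_all [walkGroups, firstHit]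
                  case false =>
                    cases h10 : PySem.Str.isIn "head of" jd
                    case true => simp_all [walkGroups, firstHit]
                    case false =>
                      cases h11 : PySem.Str.isIn "director" jd
                      case true => simp_all [walkGroups, firstHit]
                      case false =>
                        cases h12 : PySem.Str.isIn "senior manager" jd
                        case true => simp_all [walkGroups, firstHit]
                        case false =>
                          cases h13 : PySem.Str.isIn "principal" jd
                          case true => simp_all [walkGroups, firstHit]
                          case false =>
                            cases h14 : PySem.Str.isIn "manager" jd
                            case true => simp_all [walkGroups, firstHit]
                            case false =>
                              cases h15 : PySem.Str.isIn "lead" jd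
                              case true => simp_all [walkGroups, firstHit]
                              case false =>
                                simp_all [walkGroups, firstHit]

-- ===== VERDICT (by name: the statement is the Claim_ definition above) =====
theorem score_seniority_spec : Claim_equal_score_seniority := by
  intro jd _
  unfold Spec_score_seniority
  exact score_seniority_eq jd
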